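-- pv_equiv track=rewrite | github.com/VitalPointAI/axiom | api/routers/wallets.py | _derive_sync_status
-- ===== SOURCE A (Python) =====
-- _STAGE_MAP = {
--     "full_sync": ("Indexing", 0, 45),
--     "staking_sync": ("Indexing", 0, 45),
--     "lockup_sync": ("Indexing", 0, 45),
--     "evm_full_sync": ("Indexing", 0, 45),
--     "classify_transactions": ("Classifying", 45, 65),
--     "calculate_acb": ("Cost Basis", 65, 85),
--     "verify_balances": ("Verifying", 85, 100),
-- }
--
-- _STAGE_PRIORITY = {
--     "Indexing": 1,
--     "Classifying": 2,
--     "Cost Basis": 3,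
--     "Verifying": 4,
-- }
--
-- def _derive_sync_status(jobs: list) -> str:
--     """Derive a simple sync_status string from the job list for WalletResponse."""
--     active_statuses = {"queued", "running", "retrying"}
--     active_jobs = [j for j in jobs if j[3] in active_statuses]
--     if active_jobs:
--         # Find the most advanced stage
--         best_stage = None
--         best_priority = 0
--         for job in active_jobs:
--             jtype = job[2]
--             stage_info = _STAGE_MAP.get(jtype)
--             if stage_info:
--                 stage_name = stage_info[0]
--                 priority = _STAGE_PRIORITY.get(stage_name, 0)
--                 if priority > best_priority:
--                     best_priority = priority
--                     best_stage = stage_name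
--         if best_stage:
--             return best_stage.lower().replace(" ", "_")
--         return "running"
--
--     completed = {j[2] for j in jobs if j[3] == "completed"}
--     if "verify_balances" in completed or "calculate_acb" in completed:
--         return "done"
--     if completed:
--         return "done"
--     failed = [j for j in jobs if j[3] == "failed"]
--     if failed:
--         return "failed"
--     return "idle"
-- ===== SOURCE B (Python) =====
-- _STAGE_MAP = {
--     "full_sync": ("Indexing", 0, 45),
--     "staking_sync": ("Indexing", 0, 45),
--     "lockup_sync": ("Indexing", 0, 45),
--     "evm_full_sync": ("Indexing", 0, 45),
--     "classify_transactions": ("Classifying", 45, 65),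
--     "calculate_acb": ("Cost Basis", 65, 85),
--     "verify_balances": ("Verifying", 85, 100),
-- }
--
--
-- def _derive_sync_status(jobs: list) -> str:
--     """Derive a simple sync_status string from the job list for WalletResponse."""
--     active = [j for j in jobs if j[3] in ("queued", "running", "retrying")]
--     if active:
--         stages = {_STAGE_MAP[j[2]][0] for j in active if j[2] in _STAGE_MAP}
--         for name in ("Verifying", "Cost Basis", "Classifying", "Indexing"):
--             if name in stages:
--                 return name.lower().replace(" ", "_")
--         return "running"
--     if any(j[3] == "completed" for j in jobs):
--         return "done"
--     if any(j[3] == "failed" for j in jobs):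
--         return "failed"
--     return "idle"
-- ===== Notes on version B (the rewrite author's own statement) =====
-- stated objective: simpler
-- what changed: Replaces the explicit best_stage/best_priority max-scan with a set of active stage names scanned against a fixed priority-ordered tuple, and replaces the completed-set construction (with its redundant verify_balances/calculate_acb check, both branches return 'done') and the failed filter-list by two any() passes.
import Mathlib
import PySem

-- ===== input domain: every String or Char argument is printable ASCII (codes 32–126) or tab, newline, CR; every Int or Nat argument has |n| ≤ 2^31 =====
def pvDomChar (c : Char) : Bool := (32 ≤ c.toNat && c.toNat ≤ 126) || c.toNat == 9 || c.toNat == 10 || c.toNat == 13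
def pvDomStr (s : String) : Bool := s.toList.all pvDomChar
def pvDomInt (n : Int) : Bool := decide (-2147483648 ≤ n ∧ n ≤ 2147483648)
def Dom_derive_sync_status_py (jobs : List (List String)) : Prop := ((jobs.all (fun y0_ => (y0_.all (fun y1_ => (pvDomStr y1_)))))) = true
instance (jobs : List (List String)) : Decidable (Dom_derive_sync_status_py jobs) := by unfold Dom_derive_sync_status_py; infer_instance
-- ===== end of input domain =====

-- B replaces A's best_stage/best_priority max-scan by a set of active stage names probed against a
-- fixed priority-ordered list, and the completed-set / failed-list checks by two any() passes (simpler).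

-- ===== PORT A =====
-- module constant _STAGE_MAP (dict literal, distinct keys)
def stageMap : PySem.Dict String (String × Int × Int) :=
  PySem.Dict.mk
    [("full_sync", ("Indexing", 0, 45)), ("staking_sync", ("Indexing", 0, 45)),
     ("lockup_sync", ("Indexing", 0, 45)), ("evm_full_sync", ("Indexing", 0, 45)),
     ("classify_transactions", ("Classifying", 45, 65)), ("calculate_acb", ("Cost Basis", 65, 85)),
     ("verify_balances", ("Verifying", 85, 100))]

-- module constant _STAGE_PRIORITY (dict literal, distinct keys)
def stagePriority : PySem.Dict String Int :=
  PySem.Dict.mk [("Indexing", 1), ("Classifying", 2), ("Cost Basis", 3), ("Verifying", 4)]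

-- the body of A's for-loop over active_jobs (state = (best_stage, best_priority))
def aStep (bs : Option String × Int) (job : List String) : Option String × Int :=
  let jtype := PySem.List.pyGetD job 2 ""   -- job[2]; exact under Pre_ (index in range)
  match stageMap.get? jtype with
  | none => bs
  | some stage_info =>
    let stage_name := stage_info.1
    let priority := stagePriority.getD stage_name 0
    if priority > bs.2 then (some stage_name, priority) else bs

def derive_sync_status_py (jobs : List (List String)) : String :=
  let active_jobs := jobs.filter (fun j =>
    (["queued", "running", "retrying"] : List String).contains (PySem.List.pyGetD j 3 ""))
  if active_jobs.isEmpty = false then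
    let st := active_jobs.foldl aStep (none, 0)
    match st.1 with
    | some best_stage => PySem.Str.replace (PySem.Str.lower best_stage) " " "_"
    | none => "running"
  else
    let completed : PySem.Set String := PySem.Set.ofList
      ((jobs.filter (fun j => PySem.List.pyGetD j 3 "" = "completed")).map
        (fun j => PySem.List.pyGetD j 2 ""))
    if PySem.Set.contains completed "verify_balances" || PySem.Set.contains completed "calculate_acb" then
      "done"
    else if completed.isEmpty = false then "done"
    else
      let failed := jobs.filter (fun j => PySem.List.pyGetD j 3 "" = "failed")
      if failed.isEmpty = false then "failed" else "idle"

-- ===== PORT B =====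
def derive_sync_status_py_alt (jobs : List (List String)) : String :=
  let active := jobs.filter (fun j =>
    (["queued", "running", "retrying"] : List String).contains (PySem.List.pyGetD j 3 ""))
  if active.isEmpty = false then
    let stages : PySem.Set String := PySem.Set.ofList
      (active.filterMap (fun j => (stageMap.get? (PySem.List.pyGetD j 2 "")).map Prod.fst))
    match (["Verifying", "Cost Basis", "Classifying", "Indexing"] : List String).find?
        (fun n => PySem.Set.contains stages n) with
    | some name => PySem.Str.replace (PySem.Str.lower name) " " "_"
    | none => "running"
  else if jobs.any (fun j => PySem.List.pyGetD j 3 "" = "completed") then "done"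
  else if jobs.any (fun j => PySem.List.pyGetD j 3 "" = "failed") then "failed"
  else "idle"

-- ===== PRECONDITION & SPEC =====
-- Pre_: every job row has at least 4 fields; on a shorter row Python A raises IndexError at j[3] or j[2].
def Pre_derive_sync_status_py (jobs : List (List String)) : Prop :=
  ∀ j ∈ jobs, 4 ≤ j.length
instance (jobs : List (List String)) : Decidable (Pre_derive_sync_status_py jobs) := by
  unfold Pre_derive_sync_status_py; infer_instance

def pvWitness_derive_sync_status_py : List (List String) :=
  [["w1", "2024", "full_sync", "running"], ["w1", "2024", "calculate_acb", "queued"]]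

def Spec_derive_sync_status_py (jobs : List (List String)) (out : String) : Prop :=
  out = derive_sync_status_py_alt jobs
instance (jobs : List (List String)) (out : String) : Decidable (Spec_derive_sync_status_py jobs out) := by
  unfold Spec_derive_sync_status_py; infer_instance

-- ===== CLAIM (what is proved, stated in full; the proofs are below) =====
def Claim_equal_derive_sync_status_py : Prop :=
  ∀ (jobs : List (List String)), Dom_derive_sync_status_py jobs →
    Pre_derive_sync_status_py jobs →
    Spec_derive_sync_status_py jobs (derive_sync_status_py jobs)

-- ===== LEMMAS AND PROOFS =====

-- proof-side abbreviations: the stage name and priority A/B associate to one job row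
def sname (j : List String) : Option String :=
  (stageMap.get? (PySem.List.pyGetD j 2 "")).map Prod.fst

def pj (j : List String) : Int :=
  match stageMap.get? (PySem.List.pyGetD j 2 "") with
  | none => 0
  | some si => stagePriority.getD si.1 0

def dec (pr : Int) : Option String :=
  if pr = 4 then some "Verifying"
  else if pr = 3 then some "Cost Basis"
  else if pr = 2 then some "Classifying"
  else if pr = 1 then some "Indexing"
  else none

lemma stageMap_names {t : String} {si : String × Int × Int} (h : stageMap.get? t = some si) :
    si.1 = "Indexing" ∨ si.1 = "Classifying" ∨ si.1 = "Cost Basis" ∨ si.1 = "Verifying" := by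
  simp only [stageMap, PySem.Dict.get?_mk_cons] at h
  repeat' split at h
  all_goals try (cases h; simp)
  all_goals simp_all [PySem.Dict.get?]

lemma pj_sname (j : List String) :
    (pj j = 0 ∧ sname j = dec 0) ∨ (pj j = 1 ∧ sname j = dec 1) ∨ (pj j = 2 ∧ sname j = dec 2) ∨
    (pj j = 3 ∧ sname j = dec 3) ∨ (pj j = 4 ∧ sname j = dec 4) := by
  unfold pj sname
  rcases h : stageMap.get? (PySem.List.pyGetD j 2 "") with _ | si
  · left; simp [dec]
  · simp only [Option.map_some]
    rcases stageMap_names h with h1 | h1 | h1 | h1 <;> rw [h1] <;> decide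

lemma pj_bounds (j : List String) : 0 ≤ pj j ∧ pj j ≤ 4 := by
  rcases pj_sname j with ⟨h, _⟩ | ⟨h, _⟩ | ⟨h, _⟩ | ⟨h, _⟩ | ⟨h, _⟩ <;> omega

lemma sname_eq_dec (j : List String) : sname j = dec (pj j) := by
  rcases pj_sname j with ⟨h1, h2⟩ | ⟨h1, h2⟩ | ⟨h1, h2⟩ | ⟨h1, h2⟩ | ⟨h1, h2⟩ <;> rw [h1, h2]

lemma aStep_dec (j : List String) (pr : Int) (hpr : 0 ≤ pr) :
    aStep (dec pr, pr) j = (dec (max pr (pj j)), max pr (pj j)) := by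
  unfold aStep
  rcases h : stageMap.get? (PySem.List.pyGetD j 2 "") with _ | si
  · have hp : pj j = 0 := by unfold pj; rw [h]
    have hmax : max pr (pj j) = pr := by omega
    simp [h, hmax]
  · have hp : pj j = stagePriority.getD si.1 0 := by unfold pj; rw [h]
    have hd : dec (pj j) = some si.1 := by rw [← sname_eq_dec]; unfold sname; rw [h]; rfl
    simp only [h, ← hp]
    by_cases hgt : pr < pj j
    · have hmax : max pr (pj j) = pj j := by omega
      rw [if_pos hgt, hmax, hd]
    · have hmax : max pr (pj j) = pr := by omega
      rw [if_neg hgt, hmax]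

def Mfold (js : List (List String)) (pr : Int) : Int :=
  js.foldl (fun a j => max a (pj j)) pr

lemma foldl_aStep_dec (js : List (List String)) (pr : Int) (hpr : 0 ≤ pr) :
    js.foldl aStep (dec pr, pr) = (dec (Mfold js pr), Mfold js pr) := by
  induction js generalizing pr with
  | nil => rfl
  | cons j js ih =>
    simp only [List.foldl_cons, aStep_dec j pr hpr, Mfold]
    exact ih (max pr (pj j)) (by omega)

lemma Mfold_ge_iff (js : List (List String)) (pr k : Int) :
    k ≤ Mfold js pr ↔ k ≤ pr ∨ ∃ j ∈ js, k ≤ pj j := by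
  induction js generalizing pr with
  | nil => simp [Mfold]
  | cons j js ih =>
    simp only [Mfold, List.foldl_cons] at *
    rw [ih]
    constructor
    · rintro (h | h)
      · rcases le_max_iff.mp h with h | h
        · exact Or.inl h
        · exact Or.inr ⟨j, by simp, h⟩
      · rcases h with ⟨j', hm, hk⟩; exact Or.inr ⟨j', by simp [hm], hk⟩
    · rintro (h | ⟨j', hm, hk⟩)
      · exact Or.inl (le_max_of_le_left h)
      · rcases List.mem_cons.mp hm with rfl | hm
        · exact Or.inl (le_max_of_le_right hk)
        · exact Or.inr ⟨j', hm, hk⟩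

lemma Mfold_le4 (js : List (List String)) (a : Int) (ha : a ≤ 4) : Mfold js a ≤ 4 := by
  induction js generalizing a with
  | nil => simpa [Mfold]
  | cons j js ih =>
    simp only [Mfold, List.foldl_cons] at *
    exact ih (max a (pj j)) (by have := pj_bounds j; omega)

lemma mem_stages_iff (js : List (List String)) (n : String) :
    (n ∈ PySem.Set.ofList (js.filterMap (fun j => (stageMap.get? (PySem.List.pyGetD j 2 "")).map Prod.fst)))
      ↔ ∃ j ∈ js, sname j = some n := by
  rw [PySem.Set.mem_ofList, List.mem_filterMap]
  unfold sname
  constructor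
  · rintro ⟨j, hm, hj⟩; exact ⟨j, hm, hj⟩
  · rintro ⟨j, hm, hj⟩; exact ⟨j, hm, hj⟩

lemma not_exists_pj_of_lt (js : List (List String)) (k : Int) (hlt : Mfold js 0 < k) :
    ¬ ∃ j ∈ js, pj j = k := by
  rintro ⟨j, hm, hj⟩
  have := (Mfold_ge_iff js 0 k).mpr (Or.inr ⟨j, hm, le_of_eq hj.symm⟩)
  omega

lemma exists_pj_max (js : List (List String)) (hpos : 1 ≤ Mfold js 0) :
    ∃ j ∈ js, pj j = Mfold js 0 := by
  rcases (Mfold_ge_iff js 0 (Mfold js 0)).mp le_rfl with h | ⟨j, hm, hj⟩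
  · omega
  · refine ⟨j, hm, ?_⟩
    have hup := (Mfold_ge_iff js 0 (pj j)).mpr (Or.inr ⟨j, hm, le_rfl⟩)
    omega

-- membership of a priority name in B's stage set, in terms of pj
lemma contains_stages_iff (js : List (List String)) (k : Int) (hk : k = 1 ∨ k = 2 ∨ k = 3 ∨ k = 4) :
    (PySem.Set.contains (PySem.Set.ofList
        (js.filterMap (fun j => (stageMap.get? (PySem.List.pyGetD j 2 "")).map Prod.fst)))
        ((dec k).getD "") = true)
      ↔ ∃ j ∈ js, pj j = k := by
  rw [PySem.Set.contains_iff, mem_stages_iff]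
  constructor
  · rintro ⟨j, hm, hj⟩
    refine ⟨j, hm, ?_⟩
    rw [sname_eq_dec] at hj
    rcases pj_sname j with ⟨h1, _⟩ | ⟨h1, _⟩ | ⟨h1, _⟩ | ⟨h1, _⟩ | ⟨h1, _⟩ <;>
      rw [h1] at hj ⊢ <;> rcases hk with rfl | rfl | rfl | rfl <;> first | rfl | simp [dec] at hj
  · rintro ⟨j, hm, hj⟩
    refine ⟨j, hm, ?_⟩
    rw [sname_eq_dec, hj]
    rcases hk with rfl | rfl | rfl | rfl <;> rfl

lemma contains_false_not_mem {s : PySem.Set String} {x : String}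
    (h : PySem.Set.contains s x = false) : ¬ x ∈ s := by
  simpa using h

lemma contains_true_mem {s : PySem.Set String} {x : String}
    (h : PySem.Set.contains s x = true) : x ∈ s := by
  simpa using h

lemma any_iff_filter_ne_nil {α : Type} (p : α → Bool) (l : List α) :
    l.any p = true ↔ l.filter p ≠ [] := by
  simp [List.any_eq_true, List.filter_eq_nil_iff]

-- ===== VERDICT (by name: the statement is the Claim_ definition above) =====
theorem derive_sync_status_py_spec : Claim_equal_derive_sync_status_py := by
  intro jobs _hdom _hpre
  unfold Spec_derive_sync_status_py derive_sync_status_py derive_sync_status_py_alt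
  simp only []
  set js := jobs.filter (fun j =>
    (["queued", "running", "retrying"] : List String).contains (PySem.List.pyGetD j 3 "")) with hjs
  by_cases hempty : js.isEmpty = false
  · -- active branch
    simp only [hempty, if_true]
    have h0 : ((none : Option String), (0 : Int)) = (dec 0, 0) := rfl
    rw [h0, foldl_aStep_dec js 0 le_rfl]
    have hge0 : 0 ≤ Mfold js 0 := (Mfold_ge_iff js 0 0).mpr (Or.inl le_rfl)
    have hle4 : Mfold js 0 ≤ 4 := Mfold_le4 js 0 (by norm_num)
    set M := Mfold js 0 with hM
    set S := PySem.Set.ofList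
      (js.filterMap (fun j => (stageMap.get? (PySem.List.pyGetD j 2 "")).map Prod.fst)) with hS
    have habs : ∀ k : Int, M < k → k = 1 ∨ k = 2 ∨ k = 3 ∨ k = 4 →
        PySem.Set.contains S ((dec k).getD "") = false := by
      intro k hlt hk
      rw [hS, Bool.eq_false_iff]
      intro hc
      exact not_exists_pj_of_lt js k hlt ((contains_stages_iff js k hk).mp hc)
    have hpmem : 1 ≤ M → PySem.Set.contains S ((dec M).getD "") = true := by
      intro h1
      rw [hS]
      exact (contains_stages_iff js M (by omega)).mpr (exists_pj_max js h1)
    have hcase : M = 0 ∨ M = 1 ∨ M = 2 ∨ M = 3 ∨ M = 4 := by omega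
    rcases hcase with hMv | hMv | hMv | hMv | hMv
    · have c4 : PySem.Set.contains S "Verifying" = false := habs 4 (by omega) (by norm_num)
      have c3 : PySem.Set.contains S "Cost Basis" = false := habs 3 (by omega) (by norm_num)
      have c2 : PySem.Set.contains S "Classifying" = false := habs 2 (by omega) (by norm_num)
      have c1 : PySem.Set.contains S "Indexing" = false := habs 1 (by omega) (by norm_num)
      rw [hMv]
      simp [dec, contains_false_not_mem c4, contains_false_not_mem c3,
        contains_false_not_mem c2, contains_false_not_mem c1]
    · have c4 : PySem.Set.contains S "Verifying" = false := habs 4 (by omega) (by norm_num)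
      have c3 : PySem.Set.contains S "Cost Basis" = false := habs 3 (by omega) (by norm_num)
      have c2 : PySem.Set.contains S "Classifying" = false := habs 2 (by omega) (by norm_num)
      have cp : PySem.Set.contains S "Indexing" = true := by
        have h := hpmem (by omega); rw [hMv] at h; exact h
      rw [hMv]
      simp [dec, contains_false_not_mem c4, contains_false_not_mem c3,
        contains_false_not_mem c2, contains_true_mem cp]
    · have c4 : PySem.Set.contains S "Verifying" = false := habs 4 (by omega) (by norm_num)
      have c3 : PySem.Set.contains S "Cost Basis" = false := habs 3 (by omega) (by norm_num)
      have cp : PySem.Set.contains S "Classifying" = true := by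
        have h := hpmem (by omega); rw [hMv] at h; exact h
      rw [hMv]
      simp [dec, contains_false_not_mem c4, contains_false_not_mem c3,
        contains_true_mem cp]
    · have c4 : PySem.Set.contains S "Verifying" = false := habs 4 (by omega) (by norm_num)
      have cp : PySem.Set.contains S "Cost Basis" = true := by
        have h := hpmem (by omega); rw [hMv] at h; exact h
      rw [hMv]
      simp [dec, contains_false_not_mem c4, contains_true_mem cp]
    · have cp : PySem.Set.contains S "Verifying" = true := by
        have h := hpmem (by omega); rw [hMv] at h; exact h
      rw [hMv]
      simp [dec, contains_true_mem cp]
  · -- no active jobs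
    simp only [hempty]
    set cl := (jobs.filter (fun j => PySem.List.pyGetD j 3 "" = "completed")).map
      (fun j => PySem.List.pyGetD j 2 "") with hcl
    by_cases hany : jobs.any (fun j => PySem.List.pyGetD j 3 "" = "completed") = true
    · -- some completed job: A returns "done" in either of its two branches
      have hne : cl ≠ [] := by
        rw [hcl]
        simp only [ne_eq, List.map_eq_nil_iff]
        exact (any_iff_filter_ne_nil _ _).mp hany
      rcases hclv : cl with _ | ⟨x, xs⟩
      · exact absurd hclv hne
      · simp [hany, PySem.Set.ofList_cons]
    · -- no completed job
      have hnil : cl = [] := by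
        rw [hcl]
        simp only [List.map_eq_nil_iff]
        by_contra hc
        exact hany ((any_iff_filter_ne_nil _ _).mpr hc)
      rw [hnil]
      simp only [Bool.not_eq_true] at hany
      rw [hany]
      by_cases hfail : jobs.any (fun j => PySem.List.pyGetD j 3 "" = "failed") = true
      · have : jobs.filter (fun j => PySem.List.pyGetD j 3 "" = "failed") ≠ [] :=
          (any_iff_filter_ne_nil _ _).mp hfail
        simp [hfail, List.isEmpty_eq_false_iff, this]
      · simp only [Bool.not_eq_true] at hfail
        have : jobs.filter (fun j => PySem.List.pyGetD j 3 "" = "failed") = [] := by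
          by_contra hc
          rw [(any_iff_filter_ne_nil _ _).mpr hc] at hfail
          exact absurd hfail (by simp)
        simp [hfail, this]
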